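-- pv_equiv track=rewrite | github.com/hy-sksem/AtCoder | typical90/082_CountingNumbers.py | count
-- ===== SOURCE A (Python) =====
-- def count(x):
--     ret = 0
--     c = 1
--     v = 1
--     while v <= x:
--         ret = (ret + (x - v + 1) * (x + v) // 2) % MOD
--         c += 1
--         v *= 10
--     return ret
--
-- MOD = 10**9 + 7
-- ===== SOURCE B (Python) =====
-- MOD = 10**9 + 7
--
--
-- def count(x):
--     # number of decimal digits of x (0 when x <= 0)
--     ndig = 0
--     t = x
--     while t > 0:
--         t //= 10
--         ndig += 1
--     # group the integers 1..x by digit length: the d-digit block is lo..hi,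
--     # add d times its sum (difference of two triangular numbers), mod once at the end
--     total = 0
--     for d in range(1, ndig + 1):
--         lo = 10 ** (d - 1)
--         hi = min(x, 10 ** d - 1)
--         total += d * (hi * (hi + 1) // 2 - (lo - 1) * lo // 2)
--     return total % MOD
-- ===== Notes on version B (the rewrite author's own statement) =====
-- stated objective: alternative
-- what changed: A adds, for each power of ten v <= x, the stepwise suffix sum (x-v+1)(x+v)//2 reducing mod MOD every step; B first computes the digit count of x by repeated //10, then for each digit length d sums the d-digit block lo..hi as a difference of triangular numbers weighted by d, reducing mod MOD once at the end (Abel-summation swap of the double sum).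
import Mathlib
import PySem

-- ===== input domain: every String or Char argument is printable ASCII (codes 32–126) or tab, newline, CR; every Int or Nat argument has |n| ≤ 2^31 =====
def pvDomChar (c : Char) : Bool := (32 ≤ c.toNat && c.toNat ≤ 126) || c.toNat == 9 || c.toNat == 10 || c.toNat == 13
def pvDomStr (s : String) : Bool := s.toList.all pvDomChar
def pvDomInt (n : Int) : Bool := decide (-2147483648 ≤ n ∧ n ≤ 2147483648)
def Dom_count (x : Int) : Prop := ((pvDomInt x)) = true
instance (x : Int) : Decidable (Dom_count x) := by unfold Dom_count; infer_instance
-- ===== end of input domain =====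

-- B groups 1..x by digit length (digit count by repeated //10, then per-block triangular
-- sums, one final mod) instead of A's per-power-of-ten suffix sums; same output.

-- ===== PORT A =====
def MODc : Int := 1000000007

-- while v <= x: ret = (ret + (x-v+1)*(x+v)//2) % MOD; c += 1; v *= 10
-- (the proof-carrying argument 1 ≤ v only justifies termination; v starts at 1)
def countLoop (x ret c v : Int) (hv : 1 ≤ v) : Int :=
  if v ≤ x then
    countLoop x ((ret + PySem.Int.floordiv ((x - v + 1) * (x + v)) 2) % MODc)
      (c + 1) (v * 10) (by omega)
  else ret
termination_by (x + 1 - v).toNat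
decreasing_by omega

def count (x : Int) : Int := countLoop x 0 1 1 (by omega)

-- ===== PORT B =====
-- while t > 0: t //= 10; ndig += 1
def ndigLoop (t n : Int) : Int :=
  if 0 < t then ndigLoop (PySem.Int.floordiv t 10) (n + 1) else n
termination_by t.toNat
decreasing_by
  rw [PySem.Int.floordiv_eq_ediv_of_pos (by omega : (0:Int) < 10)]; omega

-- d * (hi*(hi+1)//2 - (lo-1)*lo//2) with lo = 10**(d-1), hi = min(x, 10**d - 1)
def groupTerm (x d : Int) : Int :=
  let lo : Int := 10 ^ (d - 1).toNat
  let hi : Int := min x (10 ^ d.toNat - 1)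
  d * (PySem.Int.floordiv (hi * (hi + 1)) 2 - PySem.Int.floordiv ((lo - 1) * lo) 2)

-- for d in range(1, ndig+1): total += groupTerm; return total % MOD
def count_alt (x : Int) : Int :=
  ((PySem.List.pyRange 1 (ndigLoop x 0 + 1) 1).foldl
    (fun acc d => acc + groupTerm x d) 0) % MODc

-- ===== PRECONDITION & SPEC =====
def Spec_count (x : Int) (out : Int) : Prop := out = count_alt x
instance (x : Int) (out : Int) : Decidable (Spec_count x out) := by unfold Spec_count; infer_instance

-- ===== CLAIM (what is proved, stated in full; the proofs are below) =====
def Claim_equal_count : Prop := ∀ (x : Int), Dom_count x → Spec_count x (count x)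

-- ===== LEMMAS AND PROOFS =====

-- A's per-threshold term: the suffix sum v + (v+1) + … + x
def sufS (x v : Int) : Int := PySem.Int.floordiv ((x - v + 1) * (x + v)) 2

-- sum of A's raw (un-reduced) terms over the powers of ten ≥ v
def rawA (x v : Int) (hv : 1 ≤ v) : Int :=
  if v ≤ x then sufS x v + rawA x (v * 10) (by omega)
  else 0
termination_by (x + 1 - v).toNat
decreasing_by omega

-- (a+b)*(b-a+1) is even (the two factors have opposite parity)
theorem two_dvd_tri (a b : Int) : 2 ∣ (a + b) * (b - a + 1) := by
  rcases Int.even_or_odd (a + b) with ⟨k, hk⟩ | ⟨k, hk⟩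
  · exact ⟨k * (b - a + 1), by rw [show a + b = k + k from hk]; ring⟩
  · exact ⟨(a + b) * (k - a + 1), by rw [show b = 2 * k + 1 - a by omega]; ring⟩

theorem fdiv_two_exact (a : Int) (h : 2 ∣ a) : 2 * PySem.Int.floordiv a 2 = a := by
  rw [PySem.Int.floordiv_eq_ediv_of_pos (by omega : (0:Int) < 2)]
  omega

theorem two_sufS (x v : Int) : 2 * sufS x v = (x - v + 1) * (x + v) := by
  refine fdiv_two_exact _ ?_
  have h := two_dvd_tri v x
  rw [show (x - v + 1) * (x + v) = (v + x) * (x - v + 1) by ring]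
  exact h

theorem rawA_congr (x v w : Int) (hv : 1 ≤ v) (hw : 1 ≤ w) (h : v = w) :
    rawA x v hv = rawA x w hw := by subst h; rfl

-- A's loop = (ret + raw sum) % MOD (strong induction on the remaining distance x+1-v)
theorem countLoop_eq (x : Int) : ∀ (n : Nat) (v ret c : Int) (hv : 1 ≤ v),
    ret % MODc = ret → (x + 1 - v).toNat ≤ n →
    countLoop x ret c v hv = (ret + rawA x v hv) % MODc := by
  intro n
  induction n with
  | zero =>
    intro v ret c hv hr hn
    have h : ¬ v ≤ x := by omega
    unfold countLoop rawA
    simp [h, hr]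
  | succ n ih =>
    intro v ret c hv hr hn
    unfold countLoop rawA
    by_cases h : v ≤ x
    · simp only [h, if_pos]
      rw [ih (v * 10) _ _ (by omega) (Int.emod_emod_of_dvd _ (dvd_refl MODc)) (by omega)]
      rw [Int.emod_add_emod]
      simp [sufS, add_assoc]
    · simp [h, hr]

-- the accumulator of ndigLoop merely shifts the result
theorem ndigLoop_shift : ∀ (k : Nat) (t n : Int), t.toNat ≤ k →
    ndigLoop t n = n + ndigLoop t 0 := by
  intro k
  induction k with
  | zero =>
    intro t n hk
    have h : ¬ 0 < t := by omega
    unfold ndigLoop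
    simp [h]
  | succ k ih =>
    intro t n hk
    unfold ndigLoop
    by_cases h : 0 < t
    · simp only [h, if_pos]
      have hd : PySem.Int.floordiv t 10 = t / 10 :=
        PySem.Int.floordiv_eq_ediv_of_pos (by omega : (0:Int) < 10)
      have hk' : (PySem.Int.floordiv t 10).toNat ≤ k := by rw [hd]; omega
      rw [ih _ (n + 1) hk', ih _ (0 + 1) hk']
      ring
    · simp [h]

-- ndigLoop x 0 is the digit count: 10^(N-1) ≤ x < 10^N for x ≥ 1
theorem ndig_bounds : ∀ (k : Nat) (t : Int), t.toNat ≤ k → 1 ≤ t →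
    1 ≤ ndigLoop t 0 ∧ (10:Int) ^ ((ndigLoop t 0).toNat - 1) ≤ t ∧
      t < (10:Int) ^ (ndigLoop t 0).toNat := by
  intro k
  induction k with
  | zero => intro t hk ht; omega
  | succ k ih =>
    intro t hk ht
    have h : 0 < t := by omega
    have hd : PySem.Int.floordiv t 10 = t / 10 :=
      PySem.Int.floordiv_eq_ediv_of_pos (by omega : (0:Int) < 10)
    have hstep : ndigLoop t 0 = 1 + ndigLoop (t / 10) 0 := by
      conv_lhs => unfold ndigLoop
      simp only [h, if_pos]
      rw [hd, ndigLoop_shift (t / 10).toNat _ _ (le_refl _)]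
      ring
    by_cases h10 : t < 10
    · have hz : t / 10 = 0 := by omega
      have h0 : ndigLoop (0 : Int) 0 = 0 := by unfold ndigLoop; simp
      rw [hstep, hz, h0]
      norm_num
      omega
    · have ht' : 1 ≤ t / 10 := by omega
      have hk' : (t / 10).toNat ≤ k := by omega
      obtain ⟨h1, h2, h3⟩ := ih (t / 10) hk' ht'
      set N' := ndigLoop (t / 10) 0 with hN'
      have hm : 1 ≤ N'.toNat := by omega
      have hNt : (1 + N').toNat = N'.toNat + 1 := by omega
      rw [hstep]
      refine ⟨by omega, ?_, ?_⟩
      · have : (10:Int) ^ ((1 + N').toNat - 1) = 10 * 10 ^ (N'.toNat - 1) := by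
          rw [hNt]
          rw [show N'.toNat + 1 - 1 = (N'.toNat - 1) + 1 by omega, pow_succ]
          ring
        rw [this]
        omega
      · have : (10:Int) ^ (1 + N').toNat = 10 * 10 ^ N'.toNat := by
          rw [hNt, pow_succ]; ring
        rw [this]
        omega

-- B's fold from d to N equals A's raw sum from v = 10^(d-1), shifted by (d-1) copies
-- of the suffix sum (Abel-summation swap), provided 10^(N-1) ≤ x < 10^N
theorem fold_shift (x N : Int) (hN : 1 ≤ N)
    (hx1 : (10:Int) ^ (N.toNat - 1) ≤ x) (hx2 : x < (10:Int) ^ N.toNat) :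
    ∀ (k : Nat) (d acc : Int) (hd : 1 ≤ d), (N + 1 - d).toNat ≤ k →
    (PySem.List.pyRange d (N + 1) 1).foldl (fun acc j => acc + groupTerm x j) acc
      = acc + rawA x ((10:Int) ^ (d - 1).toNat) (one_le_pow₀ (by omega))
          + (d - 1) * (if (10:Int) ^ (d - 1).toNat ≤ x then sufS x ((10:Int) ^ (d - 1).toNat) else 0) := by
  intro k
  induction k with
  | zero =>
    intro d acc _hd hk
    have h : N + 1 ≤ d := by omega
    rw [PySem.List.pyRange_one_eq_nil h, List.foldl_nil]
    have hdN : N.toNat ≤ (d - 1).toNat := by omega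
    have hbig : x < (10:Int) ^ (d - 1).toNat :=
      lt_of_lt_of_le hx2 (pow_le_pow_right₀ (by norm_num) hdN)
    rw [rawA, if_neg (not_le.mpr hbig), if_neg (not_le.mpr hbig)]
    ring
  | succ k ih =>
    intro d acc hd hk
    by_cases h : d ≤ N
    · rw [PySem.List.pyRange_one_cons (by omega : d < N + 1), List.foldl_cons]
      rw [ih (d + 1) (acc + groupTerm x d) (by omega) (by omega)]
      set lo : Int := (10:Int) ^ (d - 1).toNat with hlo
      have hlopos : (1:Int) ≤ lo := one_le_pow₀ (by omega)
      have hlo10 : (10:Int) ^ (d + 1 - 1).toNat = 10 * lo := by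
        rw [hlo, show (d + 1 - 1).toNat = (d - 1).toNat + 1 by omega, pow_succ]
        ring
      have hlox : lo ≤ x := by
        refine le_trans ?_ hx1
        exact pow_le_pow_right₀ (by norm_num) (by omega)
      have hrawA : rawA x lo hlopos
          = sufS x lo + rawA x (10 * lo) (by omega : (1:Int) ≤ 10 * lo) := by
        rw [rawA, if_pos hlox,
            rawA_congr x (lo * 10) (10 * lo) (by omega) (by omega) (by ring)]
      -- group term identity: groupTerm x d = d*S(lo) - d*(if 10lo ≤ x then S(10lo) else 0)
      have hgt : groupTerm x d
          = d * sufS x lo - d * (if 10 * lo ≤ x then sufS x (10 * lo) else 0) := by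
        have hhi : min x ((10:Int) ^ d.toNat - 1) = min x (10 * lo - 1) := by
          rw [hlo, show d.toNat = (d - 1).toNat + 1 by omega, pow_succ]
          ring_nf
        have e1 : 2 * PySem.Int.floordiv ((lo - 1) * lo) 2 = (lo - 1) * lo := by
          refine fdiv_two_exact _ ?_
          rcases Int.even_mul_succ_self (lo - 1) with ⟨m, hm⟩
          exact ⟨m, by rw [show (lo - 1) * lo = (lo - 1) * (lo - 1 + 1) by ring, hm]; ring⟩
        by_cases hc : 10 * lo ≤ x
        · have hmin : min x (10 * lo - 1) = 10 * lo - 1 := by omega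
          have e2 : 2 * PySem.Int.floordiv ((10 * lo - 1) * (10 * lo - 1 + 1)) 2
              = (10 * lo - 1) * (10 * lo - 1 + 1) := by
            refine fdiv_two_exact _ ?_
            exact (Int.even_mul_succ_self (10 * lo - 1)).two_dvd
          have hS1 := two_sufS x lo
          have hS2 := two_sufS x (10 * lo)
          simp only [groupTerm, ← hlo, hhi, hmin, hc, if_pos]
          nlinarith [e1, e2, hS1, hS2]
        · have hmin : min x (10 * lo - 1) = x := by omega
          have e2 : 2 * PySem.Int.floordiv (x * (x + 1)) 2 = x * (x + 1) := by
            refine fdiv_two_exact _ ?_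
            exact (Int.even_mul_succ_self x).two_dvd
          have hS1 := two_sufS x lo
          simp only [groupTerm, ← hlo, hhi, hmin]
          rw [if_neg hc]
          nlinarith [e1, e2, hS1]
      have hIf : (if (10:Int) ^ (d + 1 - 1).toNat ≤ x
            then sufS x ((10:Int) ^ (d + 1 - 1).toNat) else 0)
          = (if 10 * lo ≤ x then sufS x (10 * lo) else 0) := by rw [hlo10]
      rw [hgt, hrawA, rawA_congr x _ (10 * lo) _ (by omega) hlo10, hIf, if_pos hlox]
      ring
    · have hnil : N + 1 ≤ d := by omega
      rw [PySem.List.pyRange_one_eq_nil hnil, List.foldl_nil]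
      have hdN : N.toNat ≤ (d - 1).toNat := by omega
      have hbig : x < (10:Int) ^ (d - 1).toNat :=
        lt_of_lt_of_le hx2 (pow_le_pow_right₀ (by norm_num) hdN)
      rw [rawA, if_neg (not_le.mpr hbig), if_neg (not_le.mpr hbig)]
      ring

-- ===== VERDICT (by name: the statement is the Claim_ definition above) =====
theorem count_spec : Claim_equal_count := by
  intro x _
  unfold Spec_count count count_alt
  rw [countLoop_eq x (x + 1 - 1).toNat 1 0 1 (by omega) (Int.zero_emod MODc) (le_refl _)]
  by_cases hx : 1 ≤ x
  · obtain ⟨h1, h2, h3⟩ := ndig_bounds x.toNat x (le_refl _) hx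
    rw [fold_shift x (ndigLoop x 0) h1 h2 h3 ((ndigLoop x 0 + 1 - 1)).toNat 1 0 (by omega) (le_refl _),
        rawA_congr x ((10:Int) ^ ((1:Int) - 1).toNat) 1 (one_le_pow₀ (by omega)) (by omega)
          (by norm_num)]
    ring_nf
  · have hN : ndigLoop x 0 = 0 := by unfold ndigLoop; simp; omega
    rw [hN, PySem.List.pyRange_one_eq_nil (by omega), List.foldl_nil]
    rw [rawA]
    simp [not_le.mpr (by omega : x < 1)]
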